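-- pv_equiv track=rewrite | github.com/min486/Algorithm-Python | Programmers/KAKAO/22_인턴십/1_성격유형검사하기.py | solution
-- ===== SOURCE A (Python) =====
-- from collections import defaultdict
--
-- def solution(survey, choices):
--     ddic = defaultdict(int)
--     for i in range(len(choices)):
--         if choices[i] <= 3:
--             ddic[survey[i][0]] += 4 - choices[i]  # 비동의쪽 점수 획득
--         else:
--             ddic[survey[i][1]] += choices[i] - 4  # 동의쪽 점수 획득
--
--     answer = ''
--     if ddic['R'] >= ddic['T']:
--         answer += 'R'
--     else:
--         answer += 'T'
--
--     if ddic['C'] >= ddic['F']: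
--         answer += 'C'
--     else:
--         answer += 'F'
--
--     if ddic['J'] >= ddic['M']:
--         answer += 'J'
--     else:
--         answer += 'M'
--
--     if ddic['A'] >= ddic['N']:
--         answer += 'A'
--     else:
--         answer += 'N'
--
--     return answer
-- ===== SOURCE B (Python) =====
-- def solution(survey, choices):
--     deltas = [(s[0], 4 - c) if c <= 3 else (s[1], c - 4)
--               for s, c in zip(survey, choices)]
--     def score(letter):
--         return sum(d for l, d in deltas if l == letter)
--     return ''.join(a if score(a) >= score(b) else b for a, b in ('RT', 'CF', 'JM', 'AN'))
-- ===== Notes on version B (the rewrite author's own statement) =====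
-- stated objective: simpler
-- what changed: Replaces the mutable 8-key defaultdict loop plus four hardcoded if-blocks by a pure (letter, delta) list built in one comprehension and a single join over the four canonical pairs comparing per-letter sums.
import Mathlib
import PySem

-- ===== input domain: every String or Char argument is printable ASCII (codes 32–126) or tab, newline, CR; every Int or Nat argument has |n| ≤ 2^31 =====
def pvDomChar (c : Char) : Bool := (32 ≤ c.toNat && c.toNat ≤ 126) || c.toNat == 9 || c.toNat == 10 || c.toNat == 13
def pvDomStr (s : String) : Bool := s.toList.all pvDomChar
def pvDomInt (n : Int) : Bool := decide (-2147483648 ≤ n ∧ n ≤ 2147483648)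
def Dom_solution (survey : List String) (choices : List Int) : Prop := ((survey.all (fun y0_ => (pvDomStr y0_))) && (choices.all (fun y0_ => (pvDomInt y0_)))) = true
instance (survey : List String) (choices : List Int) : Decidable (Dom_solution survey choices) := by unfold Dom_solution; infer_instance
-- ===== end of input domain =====

-- B replaces A's mutable defaultdict loop and four hardcoded if-blocks by a pure
-- (letter, delta) list and one join over the four canonical pairs (objective: simpler).


-- ===== PORT A =====
-- transliteration of A: defaultdict(int) updated over range(len(choices)), then
-- four if-blocks building the answer.  The `.getD` defaults only totalize the
-- indexing that Pre_solution guarantees in range / long enough.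
def solution (survey : List String) (choices : List Int) : String :=
  let ddic : PySem.Dict Char Int :=
    (PySem.List.pyRange 0 (choices.length : Int)).foldl
      (fun d i =>
        let c := PySem.List.pyGetD choices i 0
        let s := (PySem.List.pyGetD survey i "").toList
        if c ≤ 3 then
          let k := (s[0]?).getD ' '
          d.insert k (d.getD k 0 + (4 - c))
        else
          let k := (s[1]?).getD ' '
          d.insert k (d.getD k 0 + (c - 4)))
      PySem.Dict.empty
  let a1 := if ddic.getD 'R' 0 ≥ ddic.getD 'T' 0 then 'R' else 'T'
  let a2 := if ddic.getD 'C' 0 ≥ ddic.getD 'F' 0 then 'C' else 'F'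
  let a3 := if ddic.getD 'J' 0 ≥ ddic.getD 'M' 0 then 'J' else 'M'
  let a4 := if ddic.getD 'A' 0 ≥ ddic.getD 'N' 0 then 'A' else 'N'
  String.mk [a1, a2, a3, a4]

-- ===== PORT B =====
-- transliteration of B: delta list from zip(survey, choices), per-letter score
-- by filter+sum, join over the four canonical pairs.
def pvDelta (sc : String × Int) : Char × Int :=
  if sc.2 ≤ 3 then ((sc.1.toList[0]?).getD ' ', 4 - sc.2)
  else ((sc.1.toList[1]?).getD ' ', sc.2 - 4)

def pvScore (deltas : List (Char × Int)) (x : Char) : Int :=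
  ((deltas.filter (fun ld => ld.1 == x)).map (fun ld => ld.2)).sum

def solution_alt (survey : List String) (choices : List Int) : String :=
  let deltas := (survey.zip choices).map pvDelta
  String.mk (([('R','T'), ('C','F'), ('J','M'), ('A','N')]).map
    (fun p => if pvScore deltas p.1 ≥ pvScore deltas p.2 then p.1 else p.2))

-- ===== PRECONDITION & SPEC =====
-- Pre_ excludes exactly the inputs where Python A raises IndexError:
-- survey shorter than choices, or a survey entry too short for the index A takes.
def Pre_solution (survey : List String) (choices : List Int) : Prop :=
  choices.length ≤ survey.length ∧
  ∀ p ∈ survey.zip choices,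
    (p.2 ≤ 3 → 1 ≤ p.1.toList.length) ∧ (3 < p.2 → 2 ≤ p.1.toList.length)
instance (survey : List String) (choices : List Int) : Decidable (Pre_solution survey choices) := by
  unfold Pre_solution; infer_instance

def pvWitness_solution : List String × List Int := (["RT", "FC", "JM", "AN"], [2, 5, 4, 7])

def Spec_solution (survey : List String) (choices : List Int) (out : String) : Prop := out = solution_alt survey choices
instance (survey : List String) (choices : List Int) (out : String) : Decidable (Spec_solution survey choices out) := by unfold Spec_solution; infer_instance

-- ===== CLAIM (what is proved, stated in full; the proofs are below) =====
def Claim_equal_solution : Prop := ∀ (survey : List String) (choices : List Int), Dom_solution survey choices → Pre_solution survey choices → Spec_solution survey choices (solution survey choices)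

-- ===== LEMMAS AND PROOFS =====

-- the loop body of A, on the pair of values it reads at index i
def pvStep (d : PySem.Dict Char Int) (sc : String × Int) : PySem.Dict Char Int :=
  let c := sc.2
  let s := sc.1.toList
  if c ≤ 3 then
    let k := (s[0]?).getD ' '
    d.insert k (d.getD k 0 + (4 - c))
  else
    let k := (s[1]?).getD ' '
    d.insert k (d.getD k 0 + (c - 4))

-- A's indexed fold over range(len(choices)) is the fold of pvStep over the zip
lemma pvFold_take (survey : List String) (choices : List Int)
    (h : choices.length ≤ survey.length) (k : Nat) (hk : k ≤ choices.length)
    (d : PySem.Dict Char Int) :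
    (PySem.List.pyRange 0 (k : Int)).foldl
      (fun d i =>
        let c := PySem.List.pyGetD choices i 0
        let s := (PySem.List.pyGetD survey i "").toList
        if c ≤ 3 then
          let k := (s[0]?).getD ' '
          d.insert k (d.getD k 0 + (4 - c))
        else
          let k := (s[1]?).getD ' '
          d.insert k (d.getD k 0 + (c - 4))) d
    = ((survey.zip choices).take k).foldl pvStep d := by
  induction k with
  | zero => simp [PySem.List.pyRange]
  | succ n ih =>
    have hn : n ≤ choices.length := Nat.le_of_succ_le hk
    have hns : n < survey.length := lt_of_lt_of_le (lt_of_lt_of_le hk h) (le_refl _)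
    rw [show ((n + 1 : Nat) : Int) = (n : Int) + 1 by push_cast; ring,
        PySem.List.pyRange_one_succ_right (by positivity),
        List.foldl_append, ih hn, List.take_add_one, List.foldl_append]
    have h1 : PySem.List.pyGetD choices ((n : Nat) : Int) 0 = choices.getD n 0 :=
      PySem.List.pyGetD_natCast ..
    have h2 : PySem.List.pyGetD survey ((n : Nat) : Int) "" = survey.getD n "" :=
      PySem.List.pyGetD_natCast ..
    have hz : (survey.zip choices)[n]? = some (survey[n]'(by omega), choices[n]'(by omega)) := by
      rw [List.getElem?_zip_eq_some]
      constructor <;> simp [*]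
    simp only [hz, Option.toList_some, List.foldl_cons, List.foldl_nil, h1, h2,
      List.getD_eq_getElem _ _ (by omega : n < choices.length),
      List.getD_eq_getElem _ _ (by omega : n < survey.length), pvStep]

-- score accumulated by the dict
lemma pvStep_score (d : PySem.Dict Char Int) (k : Char) (v : Int)
    (rest : List (Char × Int)) (x : Char) :
    (d.insert k (d.getD k 0 + v)).getD x 0 + pvScore rest x
      = d.getD x 0 + pvScore ((k, v) :: rest) x := by
  by_cases hx : x = k
  · simp [pvScore, hx]; ring
  · simp [pvScore, PySem.Dict.getD_insert, hx, Ne.symm hx]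

lemma pvFold_getD (l : List (String × Int)) (d : PySem.Dict Char Int) (x : Char) :
    (l.foldl pvStep d).getD x 0 = d.getD x 0 + pvScore (l.map pvDelta) x := by
  induction l generalizing d with
  | nil => simp [pvScore]
  | cons hd tl ih =>
    rw [List.foldl_cons, ih, List.map_cons]
    by_cases hc : hd.2 ≤ 3
    · rw [show pvStep d hd
          = d.insert ((hd.1.toList[0]?).getD ' ')
              (d.getD ((hd.1.toList[0]?).getD ' ') 0 + (4 - hd.2)) by
            simp [pvStep, hc],
        show pvDelta hd = (((hd.1.toList[0]?).getD ' '), 4 - hd.2) by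
            simp [pvDelta, hc]]
      exact pvStep_score ..
    · rw [show pvStep d hd
          = d.insert ((hd.1.toList[1]?).getD ' ')
              (d.getD ((hd.1.toList[1]?).getD ' ') 0 + (hd.2 - 4)) by
            simp [pvStep, hc],
        show pvDelta hd = (((hd.1.toList[1]?).getD ' '), hd.2 - 4) by
            simp [pvDelta, hc]]
      exact pvStep_score ..

lemma pvDict_getD (survey : List String) (choices : List Int)
    (h : choices.length ≤ survey.length) (x : Char) :
    ((PySem.List.pyRange 0 (choices.length : Int)).foldl
      (fun d i =>
        let c := PySem.List.pyGetD choices i 0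
        let s := (PySem.List.pyGetD survey i "").toList
        if c ≤ 3 then
          let k := (s[0]?).getD ' '
          d.insert k (d.getD k 0 + (4 - c))
        else
          let k := (s[1]?).getD ' '
          d.insert k (d.getD k 0 + (c - 4)))
      (PySem.Dict.empty : PySem.Dict Char Int)).getD x 0
    = pvScore ((survey.zip choices).map pvDelta) x := by
  rw [pvFold_take survey choices h choices.length (le_refl _),
    List.take_of_length_le (by simp),
    pvFold_getD]
  simp [PySem.Dict.getD, PySem.Dict.empty, PySem.Dict.get?]

-- ===== VERDICT (by name: the statement is the Claim_ definition above) =====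
theorem solution_spec : Claim_equal_solution := by
  intro survey choices _ hpre
  unfold Spec_solution solution solution_alt
  simp only [pvDict_getD survey choices hpre.1]
  rfl
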